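-- pv_equiv track=rewrite | github.com/prabhnoor0212/Empathy-in-Mental-Health-Support | utils/metrics.py | _spans
-- ===== SOURCE A (Python) =====
-- def _spans(l):
--     st, end = -1,-1
--     for idx, val in enumerate(l):
--         if val==1:
--             if st==-1:
--                 st=idx
--             else:
--                 continue
--         elif val==0:
--             if st==-1:
--                 continue
--             else:
--                 end=idx
--     if st==-1 and end==-1:
--         return (st,end)
--     elif st!=-1 and end==-1:
--         return (st, idx)
--     else:
--         return (st, idx)
-- ===== SOURCE B (Python) =====
-- def _spans(l):
--     # divide and conquer: first index of 1 in l[lo:hi], or -1 if none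
--     def first_one(lo, hi):
--         if hi - lo <= 1:
--             return lo if lo < hi and l[lo] == 1 else -1
--         mid = (lo + hi) // 2
--         left = first_one(lo, mid)
--         return left if left != -1 else first_one(mid, hi)
--     st = first_one(0, len(l))
--     return (-1, -1) if st == -1 else (st, len(l) - 1)
-- ===== Notes on version B (the rewrite author's own statement) =====
-- stated objective: alternative
-- what changed: B replaces A's single left-to-right loop with interleaved st/end bookkeeping by a divide-and-conquer search (recurse on halves, left half preferred) for the first index of 1, with the endpoint len(l)-1 derived in closed form.
import Mathlib
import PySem

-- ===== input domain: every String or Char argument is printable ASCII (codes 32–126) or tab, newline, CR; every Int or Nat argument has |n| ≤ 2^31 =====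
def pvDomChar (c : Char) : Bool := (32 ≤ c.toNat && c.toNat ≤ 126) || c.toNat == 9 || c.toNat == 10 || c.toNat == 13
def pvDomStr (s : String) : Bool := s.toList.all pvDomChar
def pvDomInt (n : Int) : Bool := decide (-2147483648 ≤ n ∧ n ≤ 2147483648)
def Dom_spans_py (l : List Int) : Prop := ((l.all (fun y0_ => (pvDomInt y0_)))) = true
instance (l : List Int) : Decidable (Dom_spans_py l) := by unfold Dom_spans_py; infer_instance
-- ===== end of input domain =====

-- B replaces A's single left-to-right loop with interleaved st/end bookkeeping by a
-- divide-and-conquer search for the first 1 (recurse on halves, prefer the left half)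
-- plus the closed-form endpoint len(l)-1: a different decomposition, same exact result.

-- ===== PORT A =====
-- one loop step of A's for-body: state (st, end), element (idx, val)
def spansStep (p : Int × Int) (e : Int × Int) : Int × Int :=
  if e.2 = 1 then (if p.1 = -1 then (e.1, p.2) else p)
  else if e.2 = 0 then (if p.1 = -1 then p else (p.1, e.1)) else p

def spans_py (l : List Int) : Int × Int :=
  let r := (PySem.List.enumerate l 0).foldl spansStep (-1, -1)
  -- after the loop, idx = len(l) - 1 (the final-return branches on st≠-1 both return (st, idx))
  if r.1 = -1 ∧ r.2 = -1 then (r.1, r.2) else (r.1, (l.length : Int) - 1)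

-- ===== PORT B =====
-- first index of 1 in l[lo:hi] (or -1): binary split, search the left half first.
-- Python's l[lo] is in range on every call reached (lo < len l); l.getD lo 0 is exact there,
-- and when lo ≥ len l the default 0 ≠ 1 matches Python never reaching that read.
-- fuel is a totality guard only: every call keeps hi - lo ≤ fuel, so the 0 branch is unreachable
def firstOne (l : List Int) : Nat → Nat → Nat → Int
  | 0, _, _ => -1
  | fuel + 1, lo, hi =>
    if hi ≤ lo + 1 then
      (if lo < hi ∧ l.getD lo 0 = 1 then (lo : Int) else -1)
    else
      let mid := (lo + hi) / 2
      let left := firstOne l fuel lo mid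
      if left ≠ -1 then left else firstOne l fuel mid hi

def spans_py_alt (l : List Int) : Int × Int :=
  let st := firstOne l l.length 0 l.length
  if st = -1 then (-1, -1) else (st, (l.length : Int) - 1)

-- ===== PRECONDITION & SPEC =====
def Spec_spans_py (l : List Int) (out : Int × Int) : Prop := out = spans_py_alt l
instance (l : List Int) (out : Int × Int) : Decidable (Spec_spans_py l out) := by unfold Spec_spans_py; infer_instance

-- ===== CLAIM (what is proved, stated in full; the proofs are below) =====
def Claim_equal_spans_py : Prop := ∀ (l : List Int), Dom_spans_py l → Spec_spans_py l (spans_py l)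

-- ===== LEMMAS AND PROOFS =====

-- A-SIDE: once st ≠ -1, the loop never changes st
theorem spans_fold_fst_of_ne (l : List Int) : ∀ (s st en : Int), st ≠ -1 →
    ((PySem.List.enumerate l s).foldl spansStep (st, en)).1 = st := by
  induction l with
  | nil => intro s st en h; simp [PySem.List.enumerate_nil]
  | cons x xs ih =>
    intro s st en h
    rw [PySem.List.enumerate_cons]
    simp only [List.foldl_cons, spansStep]
    split_ifs <;> simp_all

-- A-SIDE: from the initial state, st is the first index of 1 (offset by s); en stays -1 when no 1
theorem spans_fold_inv (l : List Int) : ∀ (s : Int), 0 ≤ s →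
    (PySem.List.index? l 1 = none →
       (PySem.List.enumerate l s).foldl spansStep (-1, -1) = (-1, -1)) ∧
    (∀ k, PySem.List.index? l 1 = some k →
       ((PySem.List.enumerate l s).foldl spansStep (-1, -1)).1 = s + (k : Int)) := by
  induction l with
  | nil => intro s _; simp [PySem.List.enumerate_nil, PySem.List.index?]
  | cons x xs ih =>
    intro s hs
    rw [PySem.List.enumerate_cons]
    simp only [List.foldl_cons, spansStep]
    by_cases hx : x = 1
    · subst hx
      constructor
      · intro h
        rw [PySem.List.index?_cons_self] at h; cases h
      · intro k hk
        rw [PySem.List.index?_cons_self] at hk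
        cases hk
        simp only [if_true]
        rw [spans_fold_fst_of_ne xs (s+1) s (-1) (by omega)]
        simp
    · have hrec := ih (s + 1) (by omega)
      have hidx : PySem.List.index? (x :: xs) 1 = (PySem.List.index? xs 1).map (· + 1) :=
        PySem.List.index?_cons_of_ne xs hx
      constructor
      · intro h
        rw [hidx] at h
        have hnone : PySem.List.index? xs 1 = none := by
          cases hh : PySem.List.index? xs 1 with
          | none => rfl
          | some v => rw [hh] at h; simp at h
        simp only [if_neg hx]
        split_ifs with h0
        · exact hrec.1 hnone
        · exact hrec.1 hnone
      · intro k hk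
        rw [hidx] at hk
        obtain ⟨k', hk', rfl⟩ : ∃ k', PySem.List.index? xs 1 = some k' ∧ k = k' + 1 := by
          cases hh : PySem.List.index? xs 1 with
          | none => rw [hh] at hk; simp at hk
          | some v =>
            rw [hh] at hk; simp at hk
            exact ⟨v, rfl, by omega⟩
        have := hrec.2 k' hk'
        simp only [if_neg hx]
        split_ifs with h0 <;> (rw [this]; push_cast; ring)

-- B-SIDE: index? distributes over append (first match wins in the left part)
theorem index?_append_int (s t : List Int) (v : Int) :
    PySem.List.index? (s ++ t) v =
      match PySem.List.index? s v with
      | some k => some k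
      | none => (PySem.List.index? t v).map (· + s.length) := by
  induction s with
  | nil => simp [PySem.List.index?_eq_idxOf?]
  | cons x xs ih =>
    by_cases hx : x = v
    · subst hx
      rw [List.cons_append, PySem.List.index?_cons_self, PySem.List.index?_cons_self]
    · rw [List.cons_append, PySem.List.index?_cons_of_ne _ hx,
          PySem.List.index?_cons_of_ne _ hx, ih]
      cases h : PySem.List.index? xs v with
      | none =>
        simp only [Option.map_none]
        cases PySem.List.index? t v <;> simp
        omega
      | some k => simp

-- B-SIDE, base split (hi ≤ lo+1): one-cell segment
theorem firstOne_base (l : List Int) (lo hi : Nat) (hle : hi ≤ lo + 1) :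
    (if lo < hi ∧ l.getD lo 0 = 1 then (lo : Int) else -1) =
      match PySem.List.index? ((l.drop lo).take (hi - lo)) 1 with
      | none => -1
      | some k => ((lo + k : Nat) : Int) := by
  by_cases hc : lo < hi ∧ l.getD lo 0 = 1
  · obtain ⟨hlt, hval⟩ := hc
    have hlen : lo < l.length := by
      by_contra hge
      rw [List.getD_eq_default _ _ (by omega)] at hval
      exact absurd hval (by norm_num)
    have h1 : hi - lo = 1 := by omega
    rw [if_pos ⟨hlt, hval⟩, h1, List.drop_eq_getElem_cons hlen]
    have : l[lo] = (1 : Int) := by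
      rw [← hval, List.getD_eq_getElem _ _ hlen]
    simp [this]
  · rw [if_neg hc]
    by_cases hlt : lo < hi
    · have h1 : hi - lo = 1 := by omega
      by_cases hlen : lo < l.length
      · have hval : l[lo] ≠ (1 : Int) := by
          intro he
          exact hc ⟨hlt, by rw [List.getD_eq_getElem _ _ hlen, he]⟩
        rw [h1, List.drop_eq_getElem_cons hlen, List.take_succ_cons, List.take_zero,
           PySem.List.index?_cons_of_ne _ hval]
        simp [PySem.List.index?]
      · rw [List.drop_eq_nil_of_le (by omega)]
        simp [PySem.List.index?]
    · have h0 : hi - lo = 0 := by omega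
      rw [h0]
      simp [PySem.List.index?]

-- B-SIDE: the segment l[lo:hi] splits at mid
theorem seg_split (l : List Int) (lo m hi : Nat) (h1 : lo ≤ m) (h2 : m ≤ hi) :
    (l.drop lo).take (hi - lo)
      = (l.drop lo).take (m - lo) ++ (l.drop m).take (hi - m) := by
  have he : hi - lo = (m - lo) + (hi - m) := by omega
  rw [he, List.take_add, List.drop_drop]
  have : lo + (m - lo) = m := by omega
  rw [this]

-- B-SIDE: firstOne l lo hi is the first index of 1 in the segment l[lo:hi]
theorem firstOne_eq_aux (l : List Int) : ∀ (fuel lo hi : Nat), hi - lo ≤ fuel →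
    firstOne l fuel lo hi =
      match PySem.List.index? ((l.drop lo).take (hi - lo)) 1 with
      | none => -1
      | some k => ((lo + k : Nat) : Int) := by
  intro fuel
  induction fuel with
  | zero =>
    intro lo hi h
    have h0 : hi - lo = 0 := by omega
    rw [firstOne, h0]
    simp [PySem.List.index?]
  | succ n ih =>
    intro lo hi h
    rw [firstOne]
    by_cases hle : hi ≤ lo + 1
    · rw [if_pos hle]; exact firstOne_base l lo hi hle
    · rw [if_neg hle]
      simp only []
      set m : Nat := (lo + hi) / 2 with hm
      have hlo : lo < m := by omega
      have hhi : m < hi := by omega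
      have ih1 := ih lo m (by omega)
      have ih2 := ih m hi (by omega)
      rw [seg_split l lo m hi (by omega) (by omega), index?_append_int, ih1, ih2]
      cases hL : PySem.List.index? ((l.drop lo).take (m - lo)) 1 with
      | some k =>
        simp only []
        rw [if_pos (by push_cast; omega : ((lo + k : Nat) : Int) ≠ -1)]
      | none =>
        simp only []
        cases hR : PySem.List.index? ((l.drop m).take (hi - m)) 1 with
        | none => simp
        | some k' =>
          have hmlen : m ≤ l.length := by
            by_contra hgt
            rw [List.drop_eq_nil_of_le (by omega)] at hR
            simp [PySem.List.index?] at hR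
          have hlenL : ((l.drop lo).take (m - lo)).length = m - lo := by
            simp [List.length_take, List.length_drop]; omega
          simp only [Option.map_some, hlenL]
          have : ¬ ((-1 : Int) ≠ -1) := by omega
          rw [if_neg this]
          congr 1
          omega

theorem firstOne_eq (l : List Int) (fuel lo hi : Nat) (hf : hi - lo ≤ fuel) :
    firstOne l fuel lo hi =
      match PySem.List.index? ((l.drop lo).take (hi - lo)) 1 with
      | none => -1
      | some k => ((lo + k : Nat) : Int) :=
  firstOne_eq_aux l fuel lo hi hf

-- ===== VERDICT (by name: the statement is the Claim_ definition above) =====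
theorem spans_py_spec : Claim_equal_spans_py := by
  intro l _
  unfold Spec_spans_py spans_py spans_py_alt
  have hA := spans_fold_inv l 0 le_rfl
  have hB := firstOne_eq l l.length 0 l.length (by omega)
  rw [List.drop_zero, Nat.sub_zero, List.take_length] at hB
  cases hidx : PySem.List.index? l 1 with
  | none =>
    rw [hidx] at hB
    have := hA.1 hidx
    simp [this, hB]
  | some k =>
    rw [hidx] at hB
    have h1 := hA.2 k hidx
    have hk0 : ((PySem.List.enumerate l 0).foldl spansStep (-1, -1)).1 = (k : Int) := by
      rw [h1]; ring
    have hne : ((PySem.List.enumerate l 0).foldl spansStep (-1, -1)).1 ≠ -1 := by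
      rw [hk0]; omega
    have hB' : firstOne l l.length 0 l.length = (k : Int) := by rw [hB]; simp
    rw [if_neg (by intro hc; exact hne hc.1), hk0]
    simp only [hB']
    rw [if_neg (by omega)]
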